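-- pv_equiv track=rewrite | github.com/JRAdev11/HPI.py | functions_players.py | players
-- ===== SOURCE A (Python) =====
-- def players(heights):
--     # Definition of the height ranges by position
--     positions = {
--         "C":  (208, 230),  # Center         (Pívot)
--         "PF": (203, 210),  # Power Forward  (Ala-Pívot)
--         "SF": (195, 205),  # Small Forward  (Alero)
--         "SG": (193, 198),  # Shooting Guard (Escolta)
--         "PG": (180, 193),  # Point Guard    (Base)
--     }
--
--     # We define the counters for each position
--     position_counts = {"PG": 0, "SG": 0, "SF": 0, "PF": 0, "C": 0}
--
--     # We review each height and assign it to the appropriate range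
--     for height in heights:
--         for pos, (low, high) in positions.items():
--             if low <= height <= high:
--                 if position_counts[pos] < height:
--                     position_counts[pos] = height
--     return position_counts
-- ===== SOURCE B (Python) =====
-- def players(heights):
--     # Sort once, tallest first; each position's answer is then the FIRST
--     # sorted height that falls in its range (0 if none) -- no max reduction.
--     positions = {
--         "PG": (180, 193),
--         "SG": (193, 198),
--         "SF": (195, 205),
--         "PF": (203, 210),
--         "C":  (208, 230),
--     }
--     hs = sorted(heights, reverse=True)
--     result = {}
--     for pos, (low, high) in positions.items():
--         result[pos] = next((h for h in hs if low <= h <= high), 0)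
--     return result
-- ===== Notes on version B (the rewrite author's own statement) =====
-- stated objective: alternative
-- what changed: Instead of A's single scan over heights updating a mutable per-position running-max dict, B sorts the heights once in descending order and answers each position with the first sorted height falling in its range (next(..., 0)), i.e. sort-then-first-match replaces the running-max accumulator.
import Mathlib
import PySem

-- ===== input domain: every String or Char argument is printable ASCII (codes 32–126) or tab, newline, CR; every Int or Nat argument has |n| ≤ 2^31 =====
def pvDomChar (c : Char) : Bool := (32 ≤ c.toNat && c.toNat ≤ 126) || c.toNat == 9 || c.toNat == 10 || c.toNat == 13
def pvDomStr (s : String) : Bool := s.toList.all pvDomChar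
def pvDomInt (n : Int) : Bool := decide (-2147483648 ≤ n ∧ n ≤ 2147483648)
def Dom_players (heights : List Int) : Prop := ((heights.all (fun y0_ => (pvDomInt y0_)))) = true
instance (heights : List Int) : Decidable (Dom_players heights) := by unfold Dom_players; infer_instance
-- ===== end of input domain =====

-- B sorts the heights once (tallest first) and returns, per position, the FIRST sorted
-- height inside its range (0 if none) — sort-then-first-match instead of A's per-height
-- running-max counter updates (alternative decomposition; return-value equivalence).


-- ===== PORT A =====
def players (heights : List Int) : List (String × Int) :=
  let positions : List (String × (Int × Int)) :=
    [("C", (208, 230)), ("PF", (203, 210)), ("SF", (195, 205)),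
     ("SG", (193, 198)), ("PG", (180, 193))]
  let position_counts : PySem.Dict String Int :=
    PySem.Dict.ofList [("PG", 0), ("SG", 0), ("SF", 0), ("PF", 0), ("C", 0)]
  let final := heights.foldl (fun counts height =>
    positions.foldl (fun counts p =>
      if p.2.1 ≤ height ∧ height ≤ p.2.2 then
        if counts.getD p.1 0 < height then counts.insert p.1 height else counts
      else counts) counts) position_counts
  final.items

-- ===== PORT B =====
def players_alt (heights : List Int) : List (String × Int) :=
  let positions : List (String × (Int × Int)) :=
    [("PG", (180, 193)), ("SG", (193, 198)), ("SF", (195, 205)),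
     ("PF", (203, 210)), ("C", (208, 230))]
  let hs := PySem.List.sorted heights (fun x => x) true
  let result := positions.foldl (fun result p =>
    result.insert p.1 ((hs.find? (fun h => decide (p.2.1 ≤ h ∧ h ≤ p.2.2))).getD 0))
    (PySem.Dict.mk [])
  result.items

-- ===== PRECONDITION & SPEC =====
def Spec_players (heights : List Int) (out : List (String × Int)) : Prop := out = players_alt heights
instance (heights : List Int) (out : List (String × Int)) : Decidable (Spec_players heights out) := by unfold Spec_players; infer_instance

-- ===== CLAIM (what is proved, stated in full; the proofs are below) =====
def Claim_equal_players : Prop := ∀ (heights : List Int), Dom_players heights → Spec_players heights (players heights)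

-- ===== LEMMAS AND PROOFS =====

-- A's per-height update of one counter value
def pvG (lo hi h v : Int) : Int := if lo ≤ h ∧ h ≤ hi then (if v < h then h else v) else v

-- the five single-position updates of the (invariant) literal-shaped dict
theorem pv_updC (h a b c d e : Int) :
    (if (208:Int) ≤ h ∧ h ≤ 230 then
       if (PySem.Dict.mk [("PG", a), ("SG", b), ("SF", c), ("PF", d), ("C", e)]).getD "C" 0 < h then
         (PySem.Dict.mk [("PG", a), ("SG", b), ("SF", c), ("PF", d), ("C", e)]).insert "C" h
       else PySem.Dict.mk [("PG", a), ("SG", b), ("SF", c), ("PF", d), ("C", e)]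
     else PySem.Dict.mk [("PG", a), ("SG", b), ("SF", c), ("PF", d), ("C", e)])
    = PySem.Dict.mk [("PG", a), ("SG", b), ("SF", c), ("PF", d), ("C", pvG 208 230 h e)] := by
  rw [show (PySem.Dict.mk [("PG", a), ("SG", b), ("SF", c), ("PF", d), ("C", e)]).getD "C" 0 = e from rfl]
  unfold pvG; split_ifs <;> rfl

theorem pv_updPF (h a b c d e : Int) :
    (if (203:Int) ≤ h ∧ h ≤ 210 then
       if (PySem.Dict.mk [("PG", a), ("SG", b), ("SF", c), ("PF", d), ("C", e)]).getD "PF" 0 < h then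
         (PySem.Dict.mk [("PG", a), ("SG", b), ("SF", c), ("PF", d), ("C", e)]).insert "PF" h
       else PySem.Dict.mk [("PG", a), ("SG", b), ("SF", c), ("PF", d), ("C", e)]
     else PySem.Dict.mk [("PG", a), ("SG", b), ("SF", c), ("PF", d), ("C", e)])
    = PySem.Dict.mk [("PG", a), ("SG", b), ("SF", c), ("PF", pvG 203 210 h d), ("C", e)] := by
  rw [show (PySem.Dict.mk [("PG", a), ("SG", b), ("SF", c), ("PF", d), ("C", e)]).getD "PF" 0 = d from rfl]
  unfold pvG; split_ifs <;> rfl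

theorem pv_updSF (h a b c d e : Int) :
    (if (195:Int) ≤ h ∧ h ≤ 205 then
       if (PySem.Dict.mk [("PG", a), ("SG", b), ("SF", c), ("PF", d), ("C", e)]).getD "SF" 0 < h then
         (PySem.Dict.mk [("PG", a), ("SG", b), ("SF", c), ("PF", d), ("C", e)]).insert "SF" h
       else PySem.Dict.mk [("PG", a), ("SG", b), ("SF", c), ("PF", d), ("C", e)]
     else PySem.Dict.mk [("PG", a), ("SG", b), ("SF", c), ("PF", d), ("C", e)])
    = PySem.Dict.mk [("PG", a), ("SG", b), ("SF", pvG 195 205 h c), ("PF", d), ("C", e)] := by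
  rw [show (PySem.Dict.mk [("PG", a), ("SG", b), ("SF", c), ("PF", d), ("C", e)]).getD "SF" 0 = c from rfl]
  unfold pvG; split_ifs <;> rfl

theorem pv_updSG (h a b c d e : Int) :
    (if (193:Int) ≤ h ∧ h ≤ 198 then
       if (PySem.Dict.mk [("PG", a), ("SG", b), ("SF", c), ("PF", d), ("C", e)]).getD "SG" 0 < h then
         (PySem.Dict.mk [("PG", a), ("SG", b), ("SF", c), ("PF", d), ("C", e)]).insert "SG" h
       else PySem.Dict.mk [("PG", a), ("SG", b), ("SF", c), ("PF", d), ("C", e)]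
     else PySem.Dict.mk [("PG", a), ("SG", b), ("SF", c), ("PF", d), ("C", e)])
    = PySem.Dict.mk [("PG", a), ("SG", pvG 193 198 h b), ("SF", c), ("PF", d), ("C", e)] := by
  rw [show (PySem.Dict.mk [("PG", a), ("SG", b), ("SF", c), ("PF", d), ("C", e)]).getD "SG" 0 = b from rfl]
  unfold pvG; split_ifs <;> rfl

theorem pv_updPG (h a b c d e : Int) :
    (if (180:Int) ≤ h ∧ h ≤ 193 then
       if (PySem.Dict.mk [("PG", a), ("SG", b), ("SF", c), ("PF", d), ("C", e)]).getD "PG" 0 < h then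
         (PySem.Dict.mk [("PG", a), ("SG", b), ("SF", c), ("PF", d), ("C", e)]).insert "PG" h
       else PySem.Dict.mk [("PG", a), ("SG", b), ("SF", c), ("PF", d), ("C", e)]
     else PySem.Dict.mk [("PG", a), ("SG", b), ("SF", c), ("PF", d), ("C", e)])
    = PySem.Dict.mk [("PG", pvG 180 193 h a), ("SG", b), ("SF", c), ("PF", d), ("C", e)] := by
  rw [show (PySem.Dict.mk [("PG", a), ("SG", b), ("SF", c), ("PF", d), ("C", e)]).getD "PG" 0 = a from rfl]
  unfold pvG; split_ifs <;> rfl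

-- the inner position loop on the literal-shaped dict
theorem pv_step (h a b c d e : Int) :
    ([("C", ((208:Int), (230:Int))), ("PF", (203, 210)), ("SF", (195, 205)),
      ("SG", (193, 198)), ("PG", (180, 193))].foldl (fun counts p =>
        if p.2.1 ≤ h ∧ h ≤ p.2.2 then
          if counts.getD p.1 0 < h then counts.insert p.1 h else counts
        else counts)
      (PySem.Dict.mk [("PG", a), ("SG", b), ("SF", c), ("PF", d), ("C", e)]))
    = PySem.Dict.mk [("PG", pvG 180 193 h a), ("SG", pvG 193 198 h b),
        ("SF", pvG 195 205 h c), ("PF", pvG 203 210 h d), ("C", pvG 208 230 h e)] := by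
  simp only [List.foldl]
  rw [pv_updC, pv_updPF, pv_updSF, pv_updSG, pv_updPG]

theorem pv_loop (heights : List Int) (a b c d e : Int) :
    (heights.foldl (fun counts height =>
      [("C", ((208:Int), (230:Int))), ("PF", (203, 210)), ("SF", (195, 205)),
       ("SG", (193, 198)), ("PG", (180, 193))].foldl (fun counts p =>
        if p.2.1 ≤ height ∧ height ≤ p.2.2 then
          if counts.getD p.1 0 < height then counts.insert p.1 height else counts
        else counts) counts)
      (PySem.Dict.mk [("PG", a), ("SG", b), ("SF", c), ("PF", d), ("C", e)]))
    = PySem.Dict.mk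
        [("PG", heights.foldl (fun v h => pvG 180 193 h v) a),
         ("SG", heights.foldl (fun v h => pvG 193 198 h v) b),
         ("SF", heights.foldl (fun v h => pvG 195 205 h v) c),
         ("PF", heights.foldl (fun v h => pvG 203 210 h v) d),
         ("C",  heights.foldl (fun v h => pvG 208 230 h v) e)] := by
  induction heights generalizing a b c d e with
  | nil => rfl
  | cons h t ih => rw [List.foldl_cons, pv_step, ih]; rfl

-- a fold of max over elements all ≤ the accumulator leaves it unchanged
theorem pv_foldl_max_of_le (l : List Int) (a : Int) (h : ∀ y ∈ l, y ≤ a) :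
    l.foldl max a = a := by
  induction l with
  | nil => rfl
  | cons x t ih =>
    rw [List.foldl_cons, max_eq_left (h x (List.mem_cons_self ..))]
    exact ih (fun y hy => h y (List.mem_cons_of_mem _ hy))

-- on a descending list of nonneg-where-p elements, max(filter p, default 0) is the first match
theorem pv_find_desc (p : Int → Bool) (l : List Int)
    (hd : l.Pairwise (fun a b => b ≤ a)) (hp : ∀ x, p x = true → 0 ≤ x) :
    (l.filter p).foldl max 0 = ((l.find? p).getD 0) := by
  induction l with
  | nil => rfl
  | cons x t ih =>
    rw [List.pairwise_cons] at hd
    rw [List.filter_cons, List.find?_cons]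
    by_cases hx : p x = true
    · rw [if_pos hx, hx, Option.getD_some, List.foldl_cons,
          max_eq_right (hp x hx)]
      exact pv_foldl_max_of_le _ _ (fun y hy => hd.1 y (List.mem_of_mem_filter hy))
    · rw [if_neg hx, show p x = false by simpa using hx]
      exact ih hd.2

-- A's running max over one range equals first match in the descending sorted list
theorem pv_run_eq_find (lo hi : Int) (hlo : 0 < lo) (heights : List Int) :
    heights.foldl (fun v h => pvG lo hi h v) 0
    = ((PySem.List.sorted heights (fun x => x) true).find?
        (fun h => decide (lo ≤ h ∧ h ≤ hi))).getD 0 := by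
  have h1 : ∀ (l : List Int) (v : Int),
      l.foldl (fun v h => pvG lo hi h v) v
      = (l.filter (fun h => decide (lo ≤ h ∧ h ≤ hi))).foldl max v := by
    intro l
    induction l with
    | nil => intro v; rfl
    | cons x t ih =>
      intro v
      rw [List.foldl_cons, List.filter_cons]
      by_cases hx : lo ≤ x ∧ x ≤ hi
      · rw [show pvG lo hi x v = max v x from by unfold pvG; rw [if_pos hx]; omega,
            if_pos (by simpa using hx), List.foldl_cons, ih]
      · rw [show pvG lo hi x v = v from by unfold pvG; rw [if_neg hx],
            if_neg (by simpa using hx), ih]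
  rw [h1]
  have hperm : (PySem.List.sorted heights (fun x => x) true).Perm heights :=
    PySem.List.sorted_perm ..
  rw [← pv_find_desc _ _ (by simpa using PySem.List.sorted_pairwise_rev heights (fun x => x))
        (fun x hx => by simp only [decide_eq_true_eq] at hx; omega)]
  exact List.Perm.foldl_op_eq ((hperm.filter _).symm)

-- ===== VERDICT (by name: the statement is the Claim_ definition above) =====
theorem players_spec : Claim_equal_players := by
  intro heights _
  simp only [Spec_players, players, players_alt]
  rw [show PySem.Dict.ofList [("PG", (0:Int)), ("SG", 0), ("SF", 0), ("PF", 0), ("C", 0)]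
      = PySem.Dict.mk [("PG", 0), ("SG", 0), ("SF", 0), ("PF", 0), ("C", 0)] from rfl]
  rw [pv_loop,
      pv_run_eq_find 180 193 (by omega), pv_run_eq_find 193 198 (by omega),
      pv_run_eq_find 195 205 (by omega), pv_run_eq_find 203 210 (by omega),
      pv_run_eq_find 208 230 (by omega)]
  simp only [List.foldl_cons, List.foldl_nil]
  rfl
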